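-- pv_equiv track=rewrite | github.com/polsi05/template_builder | template_builder/services/images.py | images_to_html
-- ===== SOURCE A (Python) =====
-- from typing import Dict, Iterable, List, Sequence, Tuple
--
-- def images_to_html(rows: int, cols: int) -> str:
--     """(Compatibilità) Genera una tabella HTML con placeholder `{{ IMGn }}`.
--
--     Viene usata da test e in fallback, ma solitamente si preferisce
--     `paths_to_html_grid` per le griglie reali.
--     """
--     r = max(1, int(rows))
--     c = max(1, int(cols))
--     out: List[str] = ["<table>"]
--     num = 1
--     for _ in range(r):
--         out.append("  <tr>")
--         for _ in range(c):
--             out.append(f"    <td>{{{{ IMG{num} }}}}</td>")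
--             num += 1
--         out.append("  </tr>")
--     out.append("</table>")
--     return "\n".join(out)
-- ===== SOURCE B (Python) =====
-- def images_to_html(rows: int, cols: int) -> str:
--     """Flat cell list first, then a chunking pass groups cells into rows."""
--     r = max(1, int(rows))
--     c = max(1, int(cols))
--     cells = [f"    <td>{{{{ IMG{n} }}}}</td>" for n in range(1, r * c + 1)]
--     body = []
--     for i in range(0, len(cells), c):
--         body.append("  <tr>")
--         body.extend(cells[i:i + c])
--         body.append("  </tr>")
--     return "\n".join(["<table>"] + body + ["</table>"])
-- ===== Notes on version B (the rewrite author's own statement) =====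
-- stated objective: alternative
-- what changed: B first builds one flat list of all r*c placeholder cells from a closed-form numbering, then a separate chunking pass slices it into rows of c, instead of A's interleaved nested loops with a mutable counter.
import Mathlib
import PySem

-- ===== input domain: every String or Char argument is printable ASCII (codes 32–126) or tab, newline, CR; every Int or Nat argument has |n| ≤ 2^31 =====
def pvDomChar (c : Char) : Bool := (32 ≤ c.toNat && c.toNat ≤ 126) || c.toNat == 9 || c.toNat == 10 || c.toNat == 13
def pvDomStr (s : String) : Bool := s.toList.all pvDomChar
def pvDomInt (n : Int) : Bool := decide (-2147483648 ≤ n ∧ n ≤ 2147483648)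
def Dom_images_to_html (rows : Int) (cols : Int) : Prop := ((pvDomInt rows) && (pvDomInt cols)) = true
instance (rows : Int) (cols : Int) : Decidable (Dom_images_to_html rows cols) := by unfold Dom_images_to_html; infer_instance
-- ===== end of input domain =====

-- B builds a flat list of all placeholder cells, then a chunking pass groups them into rows (alternative decomposition, same cost).


-- ===== PORT A =====
-- literal port of A: nested loops over range(r)/range(c), appending to `out`,
-- with the mutable counter `num` threaded through as the second state component.
def images_to_html (rows : Int) (cols : Int) : String :=
  let r : Int := max 1 rows
  let c : Int := max 1 cols
  let st :=
    (PySem.List.pyRange 0 r 1).foldl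
      (fun (st : List String × Int) _ =>
        let st := (st.1 ++ ["  <tr>"], st.2)
        let st :=
          (PySem.List.pyRange 0 c 1).foldl
            (fun (st : List String × Int) _ =>
              (st.1 ++ ["    <td>{{ IMG" ++ PySem.Int.toStr st.2 ++ " }}</td>"], st.2 + 1))
            st
        (st.1 ++ ["  </tr>"], st.2))
      (["<table>"], 1)
  PySem.Str.join "\n" (st.1 ++ ["</table>"])

-- ===== PORT B =====
-- literal port of Source B: flat cell list from range(1, r*c+1), then a chunking
-- pass over range(0, len(cells), c) taking the slices cells[i:i+c].
def images_to_html_alt (rows : Int) (cols : Int) : String :=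
  let r : Int := max 1 rows
  let c : Int := max 1 cols
  let cells : List String :=
    (PySem.List.pyRange 1 (r * c + 1) 1).map
      (fun n => "    <td>{{ IMG" ++ PySem.Int.toStr n ++ " }}</td>")
  let body : List String :=
    (PySem.List.pyRange 0 (cells.length : Int) c).foldl
      (fun acc i =>
        acc ++ (["  <tr>"] ++ PySem.List.slice cells (some i) (some (i + c)) ++ ["  </tr>"]))
      []
  PySem.Str.join "\n" (["<table>"] ++ body ++ ["</table>"])

-- ===== PRECONDITION & SPEC =====
def Spec_images_to_html (rows : Int) (cols : Int) (out : String) : Prop := out = images_to_html_alt rows cols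
instance (rows : Int) (cols : Int) (out : String) : Decidable (Spec_images_to_html rows cols out) := by unfold Spec_images_to_html; infer_instance

-- ===== CLAIM (what is proved, stated in full; the proofs are below) =====
def Claim_equal_images_to_html : Prop := ∀ (rows : Int) (cols : Int), Dom_images_to_html rows cols → Spec_images_to_html rows cols (images_to_html rows cols)

-- ===== LEMMAS AND PROOFS =====

-- the cell string for placeholder number n
def pvCell (n : Int) : String := "    <td>{{ IMG" ++ PySem.Int.toStr n ++ " }}</td>"

-- A's inner loop appends cells num, num+1, …, num+c-1 and advances the counter by c
lemma innerA (c : Nat) : ∀ (out : List String) (num : Int),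
    (PySem.List.pyRange 0 (c : Int) 1).foldl
      (fun (st : List String × Int) _ =>
        (st.1 ++ ["    <td>{{ IMG" ++ PySem.Int.toStr st.2 ++ " }}</td>"], st.2 + 1))
      (out, num)
    = (out ++ (List.range c).map (fun (j : Nat) => pvCell (num + j)), num + c) := by
  induction c with
  | zero => intro out num; simp [PySem.List.pyRange_one_eq_nil]
  | succ n ih =>
    intro out num
    rw [show ((n + 1 : Nat) : Int) = (n : Int) + 1 by push_cast; ring,
        PySem.List.pyRange_one_succ_right (by positivity), List.foldl_append, ih]
    simp [List.range_succ, pvCell]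
    omega

-- A's outer loop appends r row blocks and advances the counter by r*c
lemma outerA (r c : Nat) : ∀ (out : List String) (num : Int),
    (PySem.List.pyRange 0 (r : Int) 1).foldl
      (fun (st : List String × Int) _ =>
        let st := (st.1 ++ ["  <tr>"], st.2)
        let st :=
          (PySem.List.pyRange 0 (c : Int) 1).foldl
            (fun (st : List String × Int) _ =>
              (st.1 ++ ["    <td>{{ IMG" ++ PySem.Int.toStr st.2 ++ " }}</td>"], st.2 + 1))
            st
        (st.1 ++ ["  </tr>"], st.2))
      (out, num)
    = (out ++ (List.range r).flatMap
        (fun (k : Nat) => ["  <tr>"] ++ (List.range c).map (fun (j : Nat) => pvCell (num + k * c + j)) ++ ["  </tr>"]),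
       num + r * c) := by
  induction r with
  | zero => intro out num; simp [PySem.List.pyRange_one_eq_nil]
  | succ n ih =>
    intro out num
    rw [show ((n + 1 : Nat) : Int) = (n : Int) + 1 by push_cast; ring,
        PySem.List.pyRange_one_succ_right (by positivity), List.foldl_append, ih]
    simp only [List.foldl_cons, List.foldl_nil]
    rw [innerA]
    simp [List.range_succ, pvCell]
    ring

-- a take of a range' that stays inside it
lemma take_range' (s n c : Nat) (h : c ≤ n) : (List.range' s n).take c = List.range' s c := by
  rw [show n = c + (n - c) by omega, ← List.range'_append_1]
  simp

-- B's chunking pass produces the same flatMap of row blocks (numbering starts at 1)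
lemma bodyB (r c : Nat) (hr : 1 ≤ r) (hc : 1 ≤ c) :
    (PySem.List.pyRange 0 (((PySem.List.pyRange 1 ((r : Int) * c + 1) 1).map
        (fun n => "    <td>{{ IMG" ++ PySem.Int.toStr n ++ " }}</td>")).length : Int) (c : Int)).foldl
      (fun acc i =>
        acc ++ (["  <tr>"] ++ PySem.List.slice ((PySem.List.pyRange 1 ((r : Int) * c + 1) 1).map
          (fun n => "    <td>{{ IMG" ++ PySem.Int.toStr n ++ " }}</td>")) (some i) (some (i + c)) ++ ["  </tr>"]))
      []
    = (List.range r).flatMap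
        (fun (k : Nat) => ["  <tr>"] ++ (List.range c).map (fun (j : Nat) => pvCell (1 + k * c + j)) ++ ["  </tr>"]) := by
  have hpv : (fun n : Int => "    <td>{{ IMG" ++ PySem.Int.toStr n ++ " }}</td>") = pvCell := rfl
  rw [hpv]
  have h1 : ((r : Int) * c + 1 - 1).toNat = r * c := by
    rw [add_sub_cancel_right]; exact_mod_cast rfl
  have hcells : (PySem.List.pyRange 1 ((r : Int) * c + 1) 1).map pvCell
      = (List.range (r * c)).map (fun (k : Nat) => pvCell (1 + (k : Int))) := by
    rw [PySem.List.pyRange_one, List.map_map, h1]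
    rfl
  have hlen : (((PySem.List.pyRange 1 ((r : Int) * c + 1) 1).map pvCell).length : Int) = ((r * c : Nat) : Int) := by
    rw [hcells]; simp
  rw [hlen, hcells]
  rw [PySem.List.pyRange_of_pos _ _ (by exact_mod_cast hc)]
  have hN : (if (0:Int) < ((r*c : Nat):Int) then ((((r*c:Nat):Int) - 0 + c - 1) / c).toNat else 0) = r := by
    rw [if_pos (by exact_mod_cast Nat.pos_of_ne_zero (by positivity))]
    have h2 : (((r*c:Nat):Int) - 0 + c - 1) = (((r*c + c - 1 : Nat)):Int) := by push_cast; omega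
    rw [h2, show (((r*c + c - 1 : Nat)):Int) / (c:Int) = (((r*c + c - 1)/c : Nat) : Int) from (Int.natCast_div _ _).symm,
        Int.toNat_natCast, Nat.add_sub_assoc (by omega), Nat.mul_comm, Nat.mul_add_div (by omega),
        Nat.div_eq_of_lt (by omega)]
    omega
  rw [hN, List.foldl_map, PySem.List.foldl_append_eq_flatMap]
  simp only [List.nil_append]
  apply List.flatMap_congr
  intro y hy
  have hy' : y < r := List.mem_range.mp hy
  congr 1
  have hcast : (0 : Int) + (c : Int) * (y : Int) = ((c * y : Nat) : Int) := by push_cast; ring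
  rw [hcast, PySem.List.slice_natCast_add]
  rw [← List.map_drop, ← List.map_take, List.range_eq_range', List.drop_range']
  rw [take_range' _ _ _ (by exact Nat.le_sub_of_add_le (by nlinarith))]
  simp only [Nat.zero_add, Nat.mul_one]
  rw [List.range'_eq_map_range, List.map_map]
  congr 1
  apply List.map_congr_left
  intro j hj
  simp only [Function.comp]
  congr 1
  push_cast; ring

-- ===== VERDICT (by name: the statement is the Claim_ definition above) =====
theorem images_to_html_spec : Claim_equal_images_to_html := by
  intro rows cols _
  show images_to_html rows cols = images_to_html_alt rows cols
  have hr : max 1 rows = (((max 1 rows).toNat : Nat) : Int) := by omega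
  have hc : max 1 cols = (((max 1 cols).toNat : Nat) : Int) := by omega
  have hr1 : 1 ≤ (max 1 rows).toNat := by omega
  have hc1 : 1 ≤ (max 1 cols).toNat := by omega
  simp only [images_to_html, images_to_html_alt]
  rw [hr, hc, outerA, bodyB _ _ hr1 hc1]
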